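-- pv_equiv track=rewrite | github.com/sharon-chx/CS61A_summer21 | Lab, Disc, HW/lab05-mutability, orders of growth.py | lgk_pow
-- ===== SOURCE A (Python) =====
-- def lgk_pow(n, k):
--     """Computes n^k.
--
--     >>> lgk_pow(2, 3)
--     8
--     >>> lgk_pow(4, 2)
--     16
--     >>> a = lgk_pow(2, 100000000) # make sure you have log time
--     """
--     "*** YOUR CODE HERE ***"
--     if k == 0:
--     	return 1
--     elif k == 1:
--     	return n
--     elif k%2 == 0:
--     	return lgk_pow(n*n, k//2)
--     elif k%2 == 1:
--     	return n*lgk_pow(n*n, (k-1)//2)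
-- ===== SOURCE B (Python) =====
-- def lgk_pow(n, k):
--     """Computes n^k by iterative binary exponentiation (accumulator loop)."""
--     result = 1
--     base = n
--     while k > 0:
--         if k % 2 == 1:
--             result *= base
--         base *= base
--         k //= 2
--     return result
-- ===== Notes on version B (the rewrite author's own statement) =====
-- stated objective: alternative
-- what changed: Replaces the recursion on a halved exponent by an iterative exponentiation-by-squaring loop maintaining a result accumulator and a squared base.
import Mathlib
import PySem

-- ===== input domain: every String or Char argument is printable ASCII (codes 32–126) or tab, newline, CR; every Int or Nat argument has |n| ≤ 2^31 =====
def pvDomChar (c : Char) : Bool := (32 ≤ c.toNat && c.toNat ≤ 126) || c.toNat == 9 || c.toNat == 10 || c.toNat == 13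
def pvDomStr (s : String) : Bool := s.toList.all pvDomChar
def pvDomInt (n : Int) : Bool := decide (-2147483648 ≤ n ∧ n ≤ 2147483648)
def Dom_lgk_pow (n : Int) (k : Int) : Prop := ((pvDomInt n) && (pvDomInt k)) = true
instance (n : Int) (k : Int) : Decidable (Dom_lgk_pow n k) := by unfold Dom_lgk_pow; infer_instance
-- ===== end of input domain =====

-- B replaces A's recursion on a halved exponent by an iterative squaring loop with an accumulator (alternative decomposition, same O(log k) cost).


-- ===== PORT A =====
-- A's recursion does not terminate for k < 0 (Python RecursionError), so the
-- transliteration carries a fuel argument; `k.toNat + 1` fuel is always enough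
-- on the admitted domain 0 ≤ k (proved in lgk_powF_fuel below).
def lgk_powF : Nat → Int → Int → Int
  | 0, _, _ => 0
  | fuel+1, n, k =>
    if k = 0 then 1
    else if k = 1 then n
    else if PySem.Int.mod k 2 = 0 then lgk_powF fuel (n*n) (PySem.Int.floordiv k 2)
    else if PySem.Int.mod k 2 = 1 then n * lgk_powF fuel (n*n) (PySem.Int.floordiv (k-1) 2)
    else 0

def lgk_pow (n : Int) (k : Int) : Int := lgk_powF (k.toNat + 1) n k

-- ===== PORT B =====
-- state of B's while-loop: (result, base, k)
def lgk_powLoop (result : Int) (base : Int) (k : Int) : Int :=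
  if _h : 0 < k then
    lgk_powLoop (if PySem.Int.mod k 2 = 1 then result * base else result)
      (base * base) (PySem.Int.floordiv k 2)
  else result
termination_by k.toNat
decreasing_by
  have := PySem.Int.floordiv_eq_ediv_of_pos (a := k) (b := 2) (by omega)
  omega

def lgk_pow_alt (n : Int) (k : Int) : Int := lgk_powLoop 1 n k

-- ===== PRECONDITION & SPEC =====
-- Pre_ excludes k < 0, where Python A recurses forever (RecursionError).
def Pre_lgk_pow (n : Int) (k : Int) : Prop := 0 ≤ k
instance (n : Int) (k : Int) : Decidable (Pre_lgk_pow n k) := by unfold Pre_lgk_pow; infer_instance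
def pvWitness_lgk_pow : Int × Int := (3, 5)

def Spec_lgk_pow (n : Int) (k : Int) (out : Int) : Prop := out = lgk_pow_alt n k
instance (n : Int) (k : Int) (out : Int) : Decidable (Spec_lgk_pow n k out) := by unfold Spec_lgk_pow; infer_instance

-- ===== CLAIM (what is proved, stated in full; the proofs are below) =====
def Claim_equal_lgk_pow : Prop := ∀ (n : Int) (k : Int), Dom_lgk_pow n k → Pre_lgk_pow n k → Spec_lgk_pow n k (lgk_pow n k)

-- ===== LEMMAS AND PROOFS =====

-- A computes n ^ k (as a Nat exponent) whenever the fuel covers k.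
theorem lgk_powF_fuel (fuel : Nat) (n k : Int) (hk : 0 ≤ k) (hf : k.toNat < fuel) :
    lgk_powF fuel n k = n ^ k.toNat := by
  induction fuel generalizing n k with
  | zero => omega
  | succ f ih =>
    rw [lgk_powF]
    rcases eq_or_lt_of_le hk with h0 | hpos
    · simp [← h0]
    by_cases h1 : k = 1
    · simp [h1]
    have hdiv : PySem.Int.floordiv k 2 = k / 2 :=
      PySem.Int.floordiv_eq_ediv_of_pos (by omega)
    have hmod : PySem.Int.mod k 2 = k % 2 :=
      PySem.Int.mod_eq_emod_of_pos (by omega)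
    have hdiv' : PySem.Int.floordiv (k-1) 2 = (k-1) / 2 :=
      PySem.Int.floordiv_eq_ediv_of_pos (by omega)
    have hhalf : (k / 2).toNat < f := by omega
    have hhalf0 : 0 ≤ k / 2 := by omega
    rcases Int.emod_two_eq_zero_or_one k with he | ho
    · -- even case
      rw [if_neg (by omega), if_neg h1, if_pos (by rw [hmod, he]), hdiv,
        ih (n*n) (k/2) hhalf0 hhalf]
      have hk2 : k.toNat = 2 * (k / 2).toNat := by omega
      rw [hk2]; ring
    · -- odd case
      have hke : (k-1)/2 = k/2 := by omega
      rw [if_neg (by omega), if_neg h1, if_neg (by rw [hmod, ho]; decide),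
        if_pos (by rw [hmod, ho]), hdiv', hke, ih (n*n) (k/2) hhalf0 hhalf]
      have hk2 : k.toNat = 2 * (k / 2).toNat + 1 := by omega
      rw [hk2]; ring

-- B's loop invariant: it computes result * base ^ k.
theorem lgk_powLoop_eq (m : Nat) (result base k : Int) (hk : 0 ≤ k) (hm : k.toNat = m) :
    lgk_powLoop result base k = result * base ^ k.toNat := by
  induction m using Nat.strong_induction_on generalizing result base k with
  | _ m ih =>
    rw [lgk_powLoop]
    by_cases h : 0 < k
    · have hdiv : PySem.Int.floordiv k 2 = k / 2 :=
        PySem.Int.floordiv_eq_ediv_of_pos (by omega)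
      have hmod : PySem.Int.mod k 2 = k % 2 :=
        PySem.Int.mod_eq_emod_of_pos (by omega)
      have hlt : (k / 2).toNat < m := by omega
      rw [dif_pos h, hdiv, ih (k/2).toNat hlt _ _ _ (by omega) rfl]
      rcases Int.emod_two_eq_zero_or_one k with he | ho
      · rw [if_neg (by rw [hmod, he]; decide)]
        have hk2 : k.toNat = 2 * (k / 2).toNat := by omega
        rw [hk2]; ring
      · rw [if_pos (by rw [hmod, ho])]
        have hk2 : k.toNat = 2 * (k / 2).toNat + 1 := by omega
        rw [hk2]; ring
    · rw [dif_neg h]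
      have : k.toNat = 0 := by omega
      simp [this]

-- ===== VERDICT (by name: the statement is the Claim_ definition above) =====
theorem lgk_pow_spec : Claim_equal_lgk_pow := by
  intro n k _ hk
  unfold Spec_lgk_pow lgk_pow lgk_pow_alt
  rw [lgk_powF_fuel _ _ _ hk (by omega), lgk_powLoop_eq k.toNat _ _ _ hk rfl, one_mul]
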